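-- pv_equiv track=rewrite | github.com/Forte-NaoP/Problem-Solving | 백준/Gold/17623. 괄호/괄호.py | convert
-- ===== SOURCE A (Python) =====
-- def convert(x):
--     res = []
--     table = {1: '(', 2: ')', 3: '{', 4: '}', 5: '[', 6: ']'}
--     while x > 0:
--         res.append(table[x % 10])
--         x //= 10
--     res.reverse()
--     return ''.join(res)
-- ===== SOURCE B (Python) =====
-- def convert(x):
--     if x <= 0:
--         return ''
--     table = {'1': '(', '2': ')', '3': '{', '4': '}', '5': '[', '6': ']'}
--     return ''.join(table[c] for c in str(x))
-- ===== Notes on version B (the rewrite author's own statement) =====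
-- stated objective: idiomatic
-- what changed: Replaces the arithmetic digit-extraction loop with list/reverse/join by a single left-to-right scan of the decimal string str(x) through a char-keyed table, with no reversal.
import Mathlib
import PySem

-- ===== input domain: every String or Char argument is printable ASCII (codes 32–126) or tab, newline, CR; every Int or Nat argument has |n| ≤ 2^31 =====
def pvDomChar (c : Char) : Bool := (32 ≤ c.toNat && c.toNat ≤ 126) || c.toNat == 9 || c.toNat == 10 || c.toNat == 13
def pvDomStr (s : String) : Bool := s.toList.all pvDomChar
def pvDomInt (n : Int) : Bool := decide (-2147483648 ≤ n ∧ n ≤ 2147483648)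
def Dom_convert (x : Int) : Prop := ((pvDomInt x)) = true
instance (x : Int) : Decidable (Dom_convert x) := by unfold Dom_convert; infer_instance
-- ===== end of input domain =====

-- B replaces A's arithmetic digit-extraction loop (append + reverse + join) by a single
-- left-to-right scan of the decimal string str(x) through a char-keyed table (idiomatic; same cost).

-- ===== PORT A =====
-- table = {1: '(', 2: ')', 3: '{', 4: '}', 5: '[', 6: ']'}
def convertTable : PySem.Dict Int String :=
  ((((((PySem.Dict.empty.insert 1 "(").insert 2 ")").insert 3 "{").insert 4 "}").insert 5 "[").insert 6 "]")

-- the while loop: res.append(table[x % 10]); x //= 10   (getD's "" default is only reached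
-- where Python raises KeyError, i.e. outside Pre_convert)
def convertLoop (x : Int) (res : List String) : List String :=
  if _h : 0 < x then
    convertLoop (PySem.Int.floordiv x 10) (res ++ [convertTable.getD (PySem.Int.mod x 10) ""])
  else res
termination_by x.toNat
decreasing_by
  rw [PySem.Int.floordiv_eq_ediv_of_pos (by norm_num : (0:Int) < 10)]
  omega

def convert (x : Int) : String :=
  PySem.Str.join "" (convertLoop x []).reverse

-- ===== PORT B =====
-- table = {'1': '(', '2': ')', '3': '{', '4': '}', '5': '[', '6': ']'}
def convertTableAlt : PySem.Dict Char String :=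
  ((((((PySem.Dict.empty.insert '1' "(").insert '2' ")").insert '3' "{").insert '4' "}").insert '5' "[").insert '6' "]")

def convert_alt (x : Int) : String :=
  if x ≤ 0 then ""
  else PySem.Str.join "" ((PySem.Int.toStr x).toList.map (fun c => convertTableAlt.getD c ""))

-- ===== PRECONDITION & SPEC =====
-- Pre_ excludes exactly the inputs on which Python A raises KeyError: a positive x with a
-- decimal digit outside 1..6 (0,7,8,9). (B raises KeyError there too.)
def Pre_convert (x : Int) : Prop :=
  x ≤ 0 ∨ ∀ d ∈ Nat.digits 10 x.toNat, 1 ≤ d ∧ d ≤ 6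
instance (x : Int) : Decidable (Pre_convert x) := by unfold Pre_convert; infer_instance

def pvWitness_convert : Int := 123456

def Spec_convert (x : Int) (out : String) : Prop := out = convert_alt x
instance (x : Int) (out : String) : Decidable (Spec_convert x out) := by unfold Spec_convert; infer_instance

-- ===== CLAIM (what is proved, stated in full; the proofs are below) =====
def Claim_equal_convert : Prop := ∀ (x : Int), Dom_convert x → Pre_convert x → Spec_convert x (convert x)

-- ===== LEMMAS AND PROOFS =====

-- A's loop over ↑n accumulates table[d] over the least-significant-first digits of n.
theorem convertLoop_eq (n : Nat) : ∀ res : List String,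
    convertLoop (↑n) res = res ++ (Nat.digits 10 n).map (fun d => convertTable.getD (↑d) "") := by
  induction n using Nat.strong_induction_on with
  | _ n ih =>
    intro res
    rw [convertLoop]
    by_cases h : 0 < n
    · have h10 : (0:Int) < 10 := by norm_num
      rw [dif_pos (by exact_mod_cast h)]
      rw [PySem.Int.floordiv_eq_ediv_of_pos h10, PySem.Int.mod_eq_emod_of_pos h10]
      have hdiv : ((n:Int)) / 10 = ((n / 10 : Nat) : Int) := by omega
      have hmod : ((n:Int)) % 10 = ((n % 10 : Nat) : Int) := by omega
      rw [hdiv, hmod, ih (n / 10) (Nat.div_lt_self h (by norm_num)),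
        Nat.digits_def' (by norm_num : 1 < 10) h]
      simp
    · rw [dif_neg (by exact_mod_cast h)]
      simp [Nat.eq_zero_of_not_pos h]

-- Nat.toDigitsCore with enough fuel is the reversed digit list rendered through digitChar.
theorem toDigitsCore_eq : ∀ (f n : Nat) (l : List Char), 0 < n → n ≤ f →
    Nat.toDigitsCore 10 f n l = ((Nat.digits 10 n).map Nat.digitChar).reverse ++ l := by
  intro f
  induction f with
  | zero => intro n l hn hf; omega
  | succ f ih =>
    intro n l hn hf
    rw [Nat.toDigitsCore]
    rw [Nat.digits_def' (by norm_num : 1 < 10) hn]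
    by_cases h : n / 10 = 0
    · simp [h]
    · rw [if_neg h, ih (n / 10) _ (Nat.pos_of_ne_zero h)
        (by have := Nat.div_lt_self hn (by norm_num : 1 < 10); omega)]
      simp

theorem toDigits_eq (n : Nat) (hn : 0 < n) :
    Nat.toDigits 10 n = ((Nat.digits 10 n).map Nat.digitChar).reverse := by
  rw [Nat.toDigits, toDigitsCore_eq (n + 1) n [] hn (by omega), List.append_nil]

-- table agreement per digit 1..6
theorem table_agrees (d : Nat) (h1 : 1 ≤ d) (h6 : d ≤ 6) :
    convertTable.getD (↑d) "" = convertTableAlt.getD (Nat.digitChar d) "" := by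
  interval_cases d <;> decide

theorem convert_spec_aux (x : Int) (hpre : Pre_convert x) : convert x = convert_alt x := by
  rcases hpre with hle | hdig
  · -- loop never runs, both sides are ""
    rw [convert, convertLoop, dif_neg (by omega), convert_alt, if_pos hle]
    decide
  · by_cases hle : x ≤ 0
    · rw [convert, convertLoop, dif_neg (by omega), convert_alt, if_pos hle]
      decide
    · have hx : x = ((x.toNat : Nat) : Int) := by omega
      have hn : 0 < x.toNat := by omega
      rw [convert, convert_alt, if_neg hle, hx, convertLoop_eq, List.nil_append]
      have htoList : (PySem.Int.toStr ((x.toNat : Nat) : Int)).toList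
          = Nat.toDigits 10 x.toNat := by
        rw [PySem.Int.toList_toStr, PySem.Int.toChars, if_neg (by omega)]
        congr 1
      rw [htoList, toDigits_eq x.toNat hn]
      simp only [List.pure_def, List.bind_eq_flatMap, ← List.map_eq_flatMap, ← List.map_reverse, List.map_map]
      congr 1
      apply List.map_congr_left
      intro d hd
      rcases hdig d (List.mem_reverse.mp hd) with ⟨h1, h6⟩
      simpa using table_agrees d h1 h6

-- ===== VERDICT (by name: the statement is the Claim_ definition above) =====
theorem convert_spec : Claim_equal_convert := by
  intro x _ hpre
  exact convert_spec_aux x hpre
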